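-- pv_equiv track=rewrite | github.com/ajpayzant/nhl-projection-starter | nhl_projection_phase1_reset_audit/src/nhl_model/audit/field_map.py | _match_fields
-- ===== SOURCE A (Python) =====
-- from typing import Iterable
--
-- def _match_fields(columns: Iterable[str], patterns: list[str]) -> list[str]:
--     out = []
--     for c in columns:
--         lc = c.lower()
--         for p in patterns:
--             if p in lc:
--                 out.append(c)
--                 break
--     return out
-- ===== SOURCE B (Python) =====
-- from typing import Iterable
--
-- def _match_fields(columns: Iterable[str], patterns: list[str]) -> list[str]:
--     # Pattern-major sweep: each pattern scans only the still-unmatched column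
--     # indices, moving matches into a hit set; finally the hit columns are
--     # emitted in their original order.
--     cols = list(columns)
--     lows = [c.lower() for c in cols]
--     hit = set()
--     remaining = list(range(len(cols)))
--     for p in patterns:
--         still = []
--         for i in remaining:
--             if p in lows[i]:
--                 hit.add(i)
--             else:
--                 still.append(i)
--         remaining = still
--     return [c for i, c in enumerate(cols) if i in hit]
-- ===== Notes on version B (the rewrite author's own statement) =====
-- stated objective: alternative
-- what changed: B inverts the loop nesting: it lowercases every column once, then sweeps pattern-major over a shrinking list of still-unmatched column indices, moving matches into a hit set, and finally emits the hit columns in their original order, instead of A's column-major inner pattern loop with break.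
import Mathlib
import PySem

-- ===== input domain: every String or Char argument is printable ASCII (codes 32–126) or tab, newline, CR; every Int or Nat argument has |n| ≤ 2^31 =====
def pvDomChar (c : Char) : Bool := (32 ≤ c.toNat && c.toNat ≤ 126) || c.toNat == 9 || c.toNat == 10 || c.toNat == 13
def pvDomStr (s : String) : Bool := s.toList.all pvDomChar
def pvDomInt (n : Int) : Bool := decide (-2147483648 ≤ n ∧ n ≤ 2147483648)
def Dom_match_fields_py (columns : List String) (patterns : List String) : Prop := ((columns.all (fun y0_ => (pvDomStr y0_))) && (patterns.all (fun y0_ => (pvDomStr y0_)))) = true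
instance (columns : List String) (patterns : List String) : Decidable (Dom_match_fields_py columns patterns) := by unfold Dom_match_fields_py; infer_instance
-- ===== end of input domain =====

-- B inverts the loop nesting: each pattern sweeps only the still-unmatched column indices,
-- moving matches into a hit set; a final pass emits hit columns in order. Same results, no speed claim.

-- ===== PORT A =====
-- inner 'for p in patterns: if p in lc: out.append(c); break'
def aScanPats (patterns : List String) (lc : String) (c : String) (out : List String) : List String :=
  match patterns with
  | [] => out
  | p :: ps => if PySem.Str.isIn p lc then out ++ [c] else aScanPats ps lc c out

def match_fields_py (columns : List String) (patterns : List String) : List String :=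
  columns.foldl (fun out c => aScanPats patterns (PySem.Str.lower c) c out) []

-- ===== PORT B =====
-- inner 'for i in remaining: if p in lows[i]: hit.add(i) else: still.append(i)'
def bSweep (p : String) (lows : List String) : List Int → PySem.Set Int → List Int → PySem.Set Int × List Int
  | [], hit, still => (hit, still)
  | i :: rest, hit, still =>
    if PySem.Str.isIn p (PySem.List.pyGetD lows i "") then bSweep p lows rest (hit.add i) still
    else bSweep p lows rest hit (still ++ [i])

def match_fields_py_alt (columns : List String) (patterns : List String) : List String :=
  let cols := columns
  let lows := cols.map PySem.Str.lower
  let st := patterns.foldl (fun st p => bSweep p lows st.2 st.1 [])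
      (PySem.Set.empty, PySem.List.pyRange 0 (cols.length : Int) 1)
  ((PySem.List.enumerate cols 0).filter (fun ic => st.1.contains ic.1)).map (·.2)

-- ===== PRECONDITION & SPEC =====
def Spec_match_fields_py (columns : List String) (patterns : List String) (out : List String) : Prop := out = match_fields_py_alt columns patterns
instance (columns : List String) (patterns : List String) (out : List String) : Decidable (Spec_match_fields_py columns patterns out) := by unfold Spec_match_fields_py; infer_instance

-- ===== CLAIM (what is proved, stated in full; the proofs are below) =====
def Claim_equal_match_fields_py : Prop := ∀ (columns : List String) (patterns : List String), Dom_match_fields_py columns patterns → Spec_match_fields_py columns patterns (match_fields_py columns patterns)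

-- ===== LEMMAS AND PROOFS =====

-- the common predicate: some pattern occurs in the lowercased column
def anyPat (patterns : List String) (c : String) : Bool :=
  patterns.any (fun p => PySem.Str.isIn p (PySem.Str.lower c))

theorem aScanPats_eq (lc c : String) : ∀ (ps : List String) (out : List String),
    aScanPats ps lc c out = if ps.any (fun p => PySem.Str.isIn p lc) then out ++ [c] else out := by
  intro ps
  induction ps with
  | nil => intro out; simp [aScanPats]
  | cons p ps ih =>
    intro out
    by_cases h : PySem.Str.isIn p lc = true
    · simp only [aScanPats, List.any_cons, ih, h]; simp
    · rw [Bool.not_eq_true] at h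
      simp only [aScanPats, List.any_cons, ih, h]; simp

theorem match_fields_py_eq_filter (patterns : List String) : ∀ (columns acc : List String),
    columns.foldl (fun out c => aScanPats patterns (PySem.Str.lower c) c out) acc
      = acc ++ columns.filter (anyPat patterns) := by
  intro columns
  induction columns with
  | nil => intro acc; simp
  | cons c cs ih =>
    intro acc
    simp only [List.foldl_cons]
    rw [aScanPats_eq]
    have hfold : (patterns.any fun p => PySem.Str.isIn p (PySem.Str.lower c)) = anyPat patterns c := rfl
    rw [hfold, List.filter_cons]
    cases h : anyPat patterns c
    · simp [ih]
    · simp [ih]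

theorem bSweep_fst (p : String) (lows : List String) : ∀ (rem : List Int) (hit : PySem.Set Int) (still : List Int) (j : Int),
    j ∈ (bSweep p lows rem hit still).1
      ↔ j ∈ hit ∨ (j ∈ rem ∧ PySem.Str.isIn p (PySem.List.pyGetD lows j "") = true) := by
  intro rem
  induction rem with
  | nil => intro hit still j; simp [bSweep]
  | cons i rest ih =>
    intro hit still j
    by_cases hi : PySem.Str.isIn p (PySem.List.pyGetD lows i "") = true
    · rw [bSweep, if_pos hi, ih]
      simp only [PySem.Set.mem_add, List.mem_cons]
      constructor
      · rintro (⟨h | rfl⟩ | ⟨h1, h2⟩)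
        · exact Or.inl h
        · exact Or.inr ⟨Or.inl rfl, hi⟩
        · exact Or.inr ⟨Or.inr h1, h2⟩
      · rintro (h | ⟨rfl | h1, h2⟩)
        · exact Or.inl (Or.inl h)
        · exact Or.inl (Or.inr rfl)
        · exact Or.inr ⟨h1, h2⟩
    · rw [Bool.not_eq_true] at hi
      rw [bSweep, if_neg (by rw [hi]; simp), ih]
      simp only [List.mem_cons]
      constructor
      · rintro (h | ⟨h1, h2⟩)
        · exact Or.inl h
        · exact Or.inr ⟨Or.inr h1, h2⟩
      · rintro (h | ⟨rfl | h1, h2⟩)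
        · exact Or.inl h
        · exact absurd h2 (by rw [hi]; simp)
        · exact Or.inr ⟨h1, h2⟩

theorem bSweep_snd (p : String) (lows : List String) : ∀ (rem : List Int) (hit : PySem.Set Int) (still : List Int),
    (bSweep p lows rem hit still).2
      = still ++ rem.filter (fun i => !PySem.Str.isIn p (PySem.List.pyGetD lows i "")) := by
  intro rem
  induction rem with
  | nil => intro hit still; simp [bSweep]
  | cons i rest ih =>
    intro hit still
    by_cases hi : PySem.Str.isIn p (PySem.List.pyGetD lows i "") = true
    · rw [bSweep, if_pos hi, ih, List.filter_cons]
      rw [hi]; simp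
    · rw [Bool.not_eq_true] at hi
      rw [bSweep, if_neg (by rw [hi]; simp), ih, List.filter_cons]
      rw [hi]; simp

theorem hit_mem (lows : List String) : ∀ (ps : List String) (st : PySem.Set Int × List Int) (j : Int),
    (j ∈ (ps.foldl (fun st p => bSweep p lows st.2 st.1 []) st).1)
      ↔ j ∈ st.1 ∨ (j ∈ st.2 ∧ ∃ p ∈ ps, PySem.Str.isIn p (PySem.List.pyGetD lows j "") = true) := by
  intro ps
  induction ps with
  | nil => intro st j; simp
  | cons p ps ih =>
    intro st j
    simp only [List.foldl_cons]
    rw [ih, bSweep_fst, bSweep_snd, List.nil_append, List.exists_mem_cons_iff]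
    by_cases hm : PySem.Str.isIn p (PySem.List.pyGetD lows j "") = true
    · simp only [hm, List.mem_filter, Bool.not_true, Bool.false_eq_true, and_false, and_true, true_or, false_and]
      tauto
    · rw [Bool.not_eq_true] at hm
      simp only [hm, List.mem_filter, Bool.not_false, Bool.false_eq_true, and_true, false_or]
      tauto

theorem filter_enum (g : Int → Bool) (pred : String → Bool) : ∀ (cols : List String) (s : Int),
    (∀ k : Nat, ∀ hk : k < cols.length, g (s + k) = pred cols[k]) →
    ((PySem.List.enumerate cols s).filter (fun ic => g ic.1)).map (·.2) = cols.filter pred := by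
  intro cols
  induction cols with
  | nil => intro s _; simp [PySem.List.enumerate]
  | cons c cs ih =>
    intro s h
    rw [PySem.List.enumerate_cons]
    have h0 : g s = pred c := by simpa using h 0 (by simp)
    have hrest := ih (s + 1) (fun k hk => by
      have h' := h (k + 1) (by simpa using hk)
      simp only [List.getElem_cons_succ] at h'
      rw [show s + 1 + (k : Int) = s + ((k : Nat) + 1 : Nat) by push_cast; ring]
      exact h')
    rw [List.filter_cons, List.filter_cons]
    cases hp : pred c
    · rw [h0, hp]
      simpa using hrest
    · rw [h0, hp]
      simpa using hrest

-- ===== VERDICT (by name: the statement is the Claim_ definition above) =====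
theorem match_fields_py_spec : Claim_equal_match_fields_py := by
  intro columns patterns _
  unfold Spec_match_fields_py
  show _ = match_fields_py_alt columns patterns
  unfold match_fields_py match_fields_py_alt
  rw [match_fields_py_eq_filter, List.nil_append]
  rw [filter_enum _ (anyPat patterns) columns 0 ?_]
  intro k hk
  rw [zero_add, Bool.eq_iff_iff, PySem.Set.contains_iff, hit_mem]
  have hget : PySem.List.pyGetD (columns.map PySem.Str.lower) (k : Int) ""
      = PySem.Str.lower columns[k] := by
    rw [PySem.List.pyGetD_natCast]
    rw [List.getD_eq_getElem?_getD, List.getElem?_map]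
    simp [List.getElem?_eq_getElem hk]
  constructor
  · rintro (h | ⟨_, p, hp, hm⟩)
    · simp [PySem.Set.empty] at h
    · rw [hget] at hm
      exact List.any_eq_true.mpr ⟨p, hp, hm⟩
  · intro h
    rcases List.any_eq_true.mp h with ⟨p, hp, hm⟩
    refine Or.inr ⟨?_, p, hp, by rw [hget]; exact hm⟩
    show (k : Int) ∈ PySem.List.pyRange 0 (columns.length : Int) 1
    rw [PySem.List.mem_pyRange_one]
    constructor
    · positivity
    · exact_mod_cast hk
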